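-- pv_equiv track=rewrite | github.com/AtlaSent-Systems-Inc/atlasent-sdk | python/atlasent_v2_preview/atlasent_v2_preview/parse_sse.py | _split_first_line
-- ===== SOURCE A (Python) =====
-- def _split_first_line(s: str) -> tuple[str, str] | None:
--     """Split off the first complete line.
--
--     Returns ``(line, remainder)`` when a line break is found, or
--     ``None`` if the buffer doesn't yet contain a complete line.
--     Recognizes LF, CR, and CRLF. A trailing CR with no following byte
--     yet is held back in case the next chunk supplies an LF.
--     """
--     for i, c in enumerate(s):
--         if c == "\n":
--             return s[:i], s[i + 1 :]
--         if c == "\r":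
--             # Look for a following LF to consume CRLF in one go.
--             if i + 1 < len(s) and s[i + 1] == "\n":
--                 return s[:i], s[i + 2 :]
--             # Bare CR — treat as a line break unless we're at the end
--             # of the buffer (more bytes might arrive making it CRLF).
--             if i + 1 == len(s):
--                 return None
--             return s[:i], s[i + 1 :]
--     return None
-- ===== SOURCE B (Python) =====
-- def _split_first_line(s: str) -> tuple[str, str] | None:
--     # Stage 1: cut the buffer at the first CR (if any); stage 2: cut the
--     # pre-CR segment at the first LF.  An LF found there precedes every CR,
--     # so it wins and the pieces are stitched back into the remainder.
--     before_cr, cr, after_cr = s.partition("\r")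
--     line, lf, after_lf = before_cr.partition("\n")
--     if lf:                       # LF is the earliest break
--         return line, after_lf + cr + after_cr
--     if not cr:                   # no break at all
--         return None
--     if not after_cr:             # trailing bare CR: hold it back
--         return None
--     if after_cr[0] == "\n":      # CRLF
--         return before_cr, after_cr[1:]
--     return before_cr, after_cr   # bare CR mid-buffer
-- ===== Notes on version B (the rewrite author's own statement) =====
-- stated objective: faster
-- what changed: Replaced the indexed character scan by a two-stage str.partition decomposition: cut at the first CR, cut the pre-CR segment at the first LF, and stitch the pieces back into the remainder; no index arithmetic or position comparison remains.
import Mathlib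
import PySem

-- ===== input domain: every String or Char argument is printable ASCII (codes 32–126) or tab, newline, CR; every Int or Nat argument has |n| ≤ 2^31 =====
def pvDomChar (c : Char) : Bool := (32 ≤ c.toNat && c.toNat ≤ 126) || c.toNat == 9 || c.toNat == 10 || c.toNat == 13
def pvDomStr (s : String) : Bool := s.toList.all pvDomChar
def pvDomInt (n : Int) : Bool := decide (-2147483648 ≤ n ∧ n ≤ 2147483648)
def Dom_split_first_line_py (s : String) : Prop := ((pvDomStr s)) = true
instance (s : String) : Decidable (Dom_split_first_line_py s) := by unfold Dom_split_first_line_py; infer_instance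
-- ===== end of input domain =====

-- B replaces A's indexed character scan by a two-stage str.partition decomposition
-- (cut at the first CR, cut the pre-CR segment at the first LF, stitch the remainder back).


-- ===== PORT A =====
-- 'for i, c in enumerate(s)': structural recursion over the remaining characters,
-- carrying the index i.  s[:i]/s[i+1:] etc. are PySem.Str.slice (bounds here are ≥ 0).
def splitFirstLineLoop (s : String) (i : Nat) : List Char → Option (String × String)
  | [] => none                                                     -- loop ended: return None
  | c :: rest =>
    if c = '\n' then
      some (PySem.Str.slice s none (some (i : Int)), PySem.Str.slice s (some ((i : Int) + 1)) none)
    else if c = '\r' then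
      if (i : Int) + 1 < PySem.Str.len s ∧ PySem.Str.pyGet? s ((i : Int) + 1) = some '\n' then
        some (PySem.Str.slice s none (some (i : Int)), PySem.Str.slice s (some ((i : Int) + 2)) none)
      else if (i : Int) + 1 = PySem.Str.len s then none
      else some (PySem.Str.slice s none (some (i : Int)), PySem.Str.slice s (some ((i : Int) + 1)) none)
    else splitFirstLineLoop s (i + 1) rest

def split_first_line_py (s : String) : Option (String × String) :=
  splitFirstLineLoop s 0 s.toList

-- ===== PORT B =====
-- str.partition(sep) for a ONE-CHARACTER sep, on code points: exact — the text before
-- the first occurrence, the separator itself (or [] when absent), and the text after.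
def pyPartitionChar (l : List Char) (c : Char) : List Char × List Char × List Char :=
  match l with
  | [] => ([], [], [])
  | x :: xs =>
    if x = c then ([], [c], xs)
    else
      let (a, b, r) := pyPartitionChar xs c
      (x :: a, b, r)

-- Source B's body on code points (truthiness of a str is nonemptiness; t[0]/t[1:] on a
-- nonempty t are head?/tail)
def splitAltCore (l : List Char) : Option (List Char × List Char) :=
  match pyPartitionChar l '\r' with
  | (before_cr, cr, after_cr) =>
    match pyPartitionChar before_cr '\n' with
    | (line, lf, after_lf) =>
      if lf ≠ [] then some (line, after_lf ++ cr ++ after_cr)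
      else if cr = [] then none
      else if after_cr = [] then none
      else if after_cr.head? = some '\n' then some (before_cr, after_cr.tail)
      else some (before_cr, after_cr)

def split_first_line_py_alt (s : String) : Option (String × String) :=
  (splitAltCore s.toList).map (fun p => (String.ofList p.1, String.ofList p.2))

-- ===== PRECONDITION & SPEC =====
def Spec_split_first_line_py (s : String) (out : Option (String × String)) : Prop := out = split_first_line_py_alt s
instance (s : String) (out : Option (String × String)) : Decidable (Spec_split_first_line_py s out) := by unfold Spec_split_first_line_py; infer_instance

-- ===== CLAIM (what is proved, stated in full; the proofs are below) =====
def Claim_equal_split_first_line_py : Prop := ∀ (s : String), Dom_split_first_line_py s → Spec_split_first_line_py s (split_first_line_py s)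

-- ===== LEMMAS AND PROOFS =====

-- common reference function both ports are reduced to
def specFn : List Char → Option (List Char × List Char)
  | [] => none
  | c :: rest =>
    if c = '\n' then some ([], rest)
    else if c = '\r' then
      match rest with
      | [] => none
      | d :: rest' => if d = '\n' then some ([], rest') else some ([], d :: rest')
    else (specFn rest).map (fun p => (c :: p.1, p.2))

lemma partition_append (l : List Char) (c : Char) :
    (pyPartitionChar l c).1 ++ (pyPartitionChar l c).2.1 ++ (pyPartitionChar l c).2.2 = l := by
  induction l with
  | nil => simp [pyPartitionChar]
  | cons x xs ih =>
    by_cases h : x = c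
    · simp [pyPartitionChar, h]
    · simp [pyPartitionChar, h]
      simpa using ih

lemma altCore_eq_specFn (l : List Char) : splitAltCore l = specFn l := by
  induction l with
  | nil => rfl
  | cons c rest ih =>
    by_cases hcr : c = '\r'
    · subst hcr
      cases rest with
      | nil => rfl
      | cons d rest' =>
        by_cases hd : d = '\n' <;>
          simp [splitAltCore, pyPartitionChar, specFn, hd]
    · by_cases hlf : c = '\n'
      · subst hlf
        have hp := partition_append rest '\r'
        rcases hP : pyPartitionChar rest '\r' with ⟨a, b, r⟩
        rw [hP] at hp
        simp only at hp
        simp [splitAltCore, pyPartitionChar, hP, specFn, hp]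
      · rcases hP : pyPartitionChar rest '\r' with ⟨a, b, r⟩
        rcases hQ : pyPartitionChar a '\n' with ⟨line, lf, al⟩
        simp only [splitAltCore, pyPartitionChar, if_neg hcr, if_neg hlf, hP, hQ] at ih ⊢
        simp only [specFn, if_neg hlf, if_neg hcr, ← ih]
        by_cases h1 : lf = [] <;> by_cases h2 : b = [] <;>
          simp [h1, h2] <;>
          (try by_cases h3 : r = [] <;> simp [h3]) <;>
          (try by_cases h4 : r.head? = some '\n' <;> simp [h4])

lemma loop_eq_specFn (s : String) : ∀ (rest pre : List Char), s.toList = pre ++ rest →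
    splitFirstLineLoop s pre.length rest =
      (specFn rest).map (fun p => (String.ofList (pre ++ p.1), String.ofList p.2)) := by
  intro rest
  induction rest with
  | nil => intro pre h; simp [splitFirstLineLoop, specFn]
  | cons c rest ih =>
    intro pre h
    have hlenN : s.length = pre.length + 1 + rest.length := by
      rw [← String.length_toList, h]; simp; omega
    have hs : (PySem.Str.slice s none (some ((pre.length : Nat) : Int))) = String.ofList pre := by
      apply String.toList_injective
      simp only [PySem.Str.toList_slice, PySem.Chars.slice_eq_listSlice,
        PySem.List.slice_to_natCast, h]
      simp
    have hs1 : PySem.Str.slice s (some ((pre.length : Int) + 1)) none = String.ofList rest := by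
      apply String.toList_injective
      have e : ((pre.length : Int) + 1) = ((pre.length + 1 : Nat) : Int) := by push_cast; ring
      rw [e]
      simp only [PySem.Str.toList_slice, PySem.Chars.slice_eq_listSlice,
        PySem.List.slice_from_natCast, h]
      simp [List.drop_append]
    by_cases hlf : c = '\n'
    · subst hlf
      simp [splitFirstLineLoop, specFn, hs, hs1]
    · by_cases hcr : c = '\r'
      · subst hcr
        have hget : PySem.List.pyGet? s.toList ((pre.length : Int) + 1) = rest.head? := by
          have e : ((pre.length : Int) + 1) = ((pre.length + 1 : Nat) : Int) := by push_cast; ring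
          rw [e, PySem.List.pyGet?_natCast, h, List.getElem?_append_right (by omega)]
          simp [List.head?_eq_getElem?]
        cases rest with
        | nil =>
          have hle : ((pre.length : Int) + 1 = (s.length : Int)) := by
            simp only [List.length_nil] at hlenN; omega
          simp [splitFirstLineLoop, specFn, hle]
        | cons d rest' =>
          have hlt : (pre.length : Int) + 1 < (s.length : Int) := by
            simp only [List.length_cons] at hlenN; omega
          have hne : ¬ ((pre.length : Int) + 1 = (s.length : Int)) := by
            simp only [List.length_cons] at hlenN; omega
          by_cases hd : d = '\n'
          · subst hd
            have hget' : PySem.List.pyGet? s.toList ((pre.length : Int) + 1) = some '\n' := by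
              simpa using hget
            have hs2 : PySem.Str.slice s (some ((pre.length : Int) + 2)) none = String.ofList rest' := by
              apply String.toList_injective
              have e : ((pre.length : Int) + 2) = ((pre.length + 2 : Nat) : Int) := by push_cast; ring
              rw [e]
              simp only [PySem.Str.toList_slice, PySem.Chars.slice_eq_listSlice,
                PySem.List.slice_from_natCast, h]
              simp [List.drop_append]
            simp [splitFirstLineLoop, specFn, hlt, hget', hs, hs2]
          · have hget' : PySem.List.pyGet? s.toList ((pre.length : Int) + 1) = some d := by
              simpa using hget
            simp [splitFirstLineLoop, specFn, hlt, hget', hd, hne, hs, hs1]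
      · have h' : s.toList = (pre ++ [c]) ++ rest := by simp [h]
        have hrec := ih (pre ++ [c]) h'
        simp only [List.length_append, List.length_singleton] at hrec
        simp only [splitFirstLineLoop]
        rw [if_neg hlf, if_neg hcr, hrec]
        simp only [specFn]
        rw [if_neg hlf, if_neg hcr]
        cases specFn rest <;> simp

-- ===== VERDICT (by name: the statement is the Claim_ definition above) =====
theorem split_first_line_py_spec : Claim_equal_split_first_line_py := by
  intro s _
  unfold Spec_split_first_line_py split_first_line_py split_first_line_py_alt
  rw [altCore_eq_specFn]
  have hmain := loop_eq_specFn s s.toList [] (by simp)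
  simpa using hmain
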